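-- pv_equiv track=rewrite | github.com/CMMRLab/LUNAR | src/bond_react_merge/reduce_topology.py | find_rxn_pairs
-- ===== SOURCE A (Python) =====
-- def find_rxn_pairs(merge):
--     template_pairs = {} # {1:[pre1, post1], 2:[pre2, post2], ... N:[] }
--     for file in merge:
--         # strip last number of filename. Assumes tags either:
--         tmpname = ''.join([i for i in file if i.isalpha()])
--         tmpid = ''.join([i for i in file if i.isdigit()])
--
--         # Log pairs if tmpid exists, else create key/valued list if tmpname is not data
--         if tmpname != 'data':
--             if tmpid in template_pairs:
--                 template_pairs[tmpid].append(file)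
--             else: template_pairs[tmpid] = [file]
--
--     # Loop through template_pairs and try finding map
--     return template_pairs
-- ===== SOURCE B (Python) =====
-- def find_rxn_pairs(merge):
--     # Filter-then-group: one comprehension keeps non-'data' files paired with
--     # their digit-only id, then the dict is built per distinct id (first-occurrence order).
--     pairs = [(''.join(c for c in f if c.isdigit()), f)
--              for f in merge
--              if ''.join(c for c in f if c.isalpha()) != 'data']
--     keys = dict.fromkeys(i for i, _ in pairs)
--     return {k: [f for i, f in pairs if i == k] for k in keys}
-- ===== Notes on version B (the rewrite author's own statement) =====
-- stated objective: alternative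
-- what changed: Replaces A's incremental dict build (membership test + append/insert per file) with a filter-then-group decomposition: one pass computes the kept (id, file) pairs, the distinct ids are taken via dict.fromkeys, and each group is gathered per id.
import Mathlib
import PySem

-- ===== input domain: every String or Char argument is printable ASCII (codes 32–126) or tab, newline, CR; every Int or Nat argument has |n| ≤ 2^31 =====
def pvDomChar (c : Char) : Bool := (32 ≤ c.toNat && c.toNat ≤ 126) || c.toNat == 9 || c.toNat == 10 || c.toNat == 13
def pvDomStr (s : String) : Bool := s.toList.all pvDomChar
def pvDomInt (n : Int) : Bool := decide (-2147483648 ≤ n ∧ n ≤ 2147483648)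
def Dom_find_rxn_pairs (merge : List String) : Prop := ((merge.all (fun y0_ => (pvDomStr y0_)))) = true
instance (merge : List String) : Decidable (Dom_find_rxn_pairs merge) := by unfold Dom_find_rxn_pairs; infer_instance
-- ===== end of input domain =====

-- B replaces A's incremental dict build with a filter-then-group decomposition (alternative, not faster).

-- ===== PORT A =====
-- A: one loop over merge, maintaining the dict; per file, membership test then append / insert.
def find_rxn_pairs (merge : List String) : List (String × List String) :=
  (merge.foldl (fun template_pairs file =>
      let tmpname := String.ofList (file.toList.filter PySem.Chars.isalpha)
      let tmpid := String.ofList (file.toList.filter PySem.Chars.isdigit)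
      if tmpname ≠ "data" then
        if template_pairs.contains tmpid then
          template_pairs.modify tmpid [] (fun l => l ++ [file])   -- template_pairs[tmpid].append(file)
        else template_pairs.insert tmpid [file]
      else template_pairs)
    PySem.Dict.empty).items

-- ===== PORT B =====
-- B: kept (id, file) pairs in one comprehension, distinct ids via dict.fromkeys, groups gathered per id.
def find_rxn_pairs_alt (merge : List String) : List (String × List String) :=
  let pairs := merge.filterMap (fun f =>
      if String.ofList (f.toList.filter PySem.Chars.isalpha) ≠ "data" then
        some (String.ofList (f.toList.filter PySem.Chars.isdigit), f)
      else none)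
  let keys := PySem.List.dedup (pairs.map Prod.fst)
  keys.map (fun k => (k, (pairs.filter (fun p => p.1 == k)).map (fun p => p.2)))

-- ===== PRECONDITION & SPEC =====
def Spec_find_rxn_pairs (merge : List String) (out : List (String × List String)) : Prop := out = find_rxn_pairs_alt merge
instance (merge : List String) (out : List (String × List String)) : Decidable (Spec_find_rxn_pairs merge out) := by unfold Spec_find_rxn_pairs; infer_instance

-- ===== CLAIM (what is proved, stated in full; the proofs are below) =====
def Claim_equal_find_rxn_pairs : Prop := ∀ (merge : List String), Dom_find_rxn_pairs merge → Spec_find_rxn_pairs merge (find_rxn_pairs merge)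

-- ===== LEMMAS AND PROOFS =====

-- A comprehension with a filter is a map over the filtered list.
lemma filterMap_if_eq_map_filter {α β : Type} (p : α → Prop) [DecidablePred p] (g : α → β) (l : List α) :
    l.filterMap (fun x => if p x then some (g x) else none)
      = (l.filter (fun x => decide (p x))).map g := by
  induction l with
  | nil => rfl
  | cons x t ih => by_cases h : p x <;> simp [h, ih]

-- The keys of the grouping fold are the first-occurrence-distinct ids.
lemma keys_group_fold (l : List (String × String)) (d : PySem.Dict String (List String)) :
    (l.foldl (fun d p => d.modify p.1 [] (fun v => v ++ [p.2])) d).keys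
      = PySem.Set.update d.keys (l.map Prod.fst) := by
  induction l generalizing d with
  | nil => simp [PySem.Set.update]
  | cons p t ih =>
      rw [List.foldl_cons, ih]
      have hk : (d.modify p.1 [] (fun v => v ++ [p.2])).keys = PySem.Set.add d.keys p.1 := by
        by_cases h : d.contains p.1 = true
        · rw [PySem.Dict.keys_modify, PySem.Dict.keys_insert_of_contains _ _ h]
          simp only [PySem.Dict.contains_eq_decide_mem_keys, decide_eq_true_eq] at h
          simp [PySem.Set.add, PySem.Set.contains, h]
        · rw [PySem.Dict.keys_modify,
              PySem.Dict.keys_insert_of_not_contains _ _ (by simpa using h)]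
          simp only [PySem.Dict.contains_eq_decide_mem_keys, decide_eq_true_eq] at h
          simp [PySem.Set.add, PySem.Set.contains, h]
      rw [hk]
      simp [PySem.Set.update]

-- The grouping fold keeps its keys without duplicates.
lemma nodup_keys_group_fold (l : List (String × String)) (d : PySem.Dict String (List String))
    (hd : d.keys.Nodup) :
    (l.foldl (fun d p => d.modify p.1 [] (fun v => v ++ [p.2])) d).keys.Nodup := by
  induction l generalizing d with
  | nil => exact hd
  | cons p t ih =>
      rw [List.foldl_cons]
      exact ih _ (by simpa [PySem.Dict.modify] using PySem.Dict.nodup_keys_insert _ _ _ hd)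

-- A's if/else body on a kept file is exactly the grouping (modify) step.
lemma stepA_eq_modify (d : PySem.Dict String (List String)) (file : String) :
    (if d.contains (String.ofList (file.toList.filter PySem.Chars.isdigit)) then
       d.modify (String.ofList (file.toList.filter PySem.Chars.isdigit)) [] (fun l => l ++ [file])
     else d.insert (String.ofList (file.toList.filter PySem.Chars.isdigit)) [file])
      = d.modify (String.ofList (file.toList.filter PySem.Chars.isdigit)) [] (fun l => l ++ [file]) := by
  by_cases h : d.contains (String.ofList (file.toList.filter PySem.Chars.isdigit)) = true
  · simp [h]
  · have hg := PySem.Dict.getD_of_not_contains (d := d)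
      (k := String.ofList (file.toList.filter PySem.Chars.isdigit)) (d0 := ([] : List String))
      (by simpa using h)
    simp [h, PySem.Dict.modify, hg]

theorem find_rxn_pairs_equal (merge : List String) :
    find_rxn_pairs merge = find_rxn_pairs_alt merge := by
  unfold find_rxn_pairs find_rxn_pairs_alt
  show (merge.foldl (fun d file =>
          if String.ofList (file.toList.filter PySem.Chars.isalpha) ≠ "data" then
            if d.contains (String.ofList (file.toList.filter PySem.Chars.isdigit)) then
              d.modify (String.ofList (file.toList.filter PySem.Chars.isdigit)) [] (fun l => l ++ [file])
            else d.insert (String.ofList (file.toList.filter PySem.Chars.isdigit)) [file]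
          else d) PySem.Dict.empty).items
      = (PySem.List.dedup ((merge.filterMap (fun f =>
            if String.ofList (f.toList.filter PySem.Chars.isalpha) ≠ "data" then
              some (String.ofList (f.toList.filter PySem.Chars.isdigit), f)
            else none)).map Prod.fst)).map
          (fun k => (k, ((merge.filterMap (fun f =>
            if String.ofList (f.toList.filter PySem.Chars.isalpha) ≠ "data" then
              some (String.ofList (f.toList.filter PySem.Chars.isdigit), f)
            else none)).filter (fun p => p.1 == k)).map (fun p => p.2)))
  rw [PySem.List.foldl_congr_mem merge _ (fun d file =>
        if String.ofList (file.toList.filter PySem.Chars.isalpha) ≠ "data" then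
          d.modify (String.ofList (file.toList.filter PySem.Chars.isdigit)) [] (fun l => l ++ [file])
        else d)
      PySem.Dict.empty
      (fun d file _ => by
        by_cases h : String.ofList (file.toList.filter PySem.Chars.isalpha) ≠ "data" <;>
          simp [h, stepA_eq_modify])]
  simp only [PySem.List.foldl_ite_eq_foldl_filter]
  simp only [filterMap_if_eq_map_filter]
  set pairs := ((merge.filter (fun f =>
      decide (String.ofList (f.toList.filter PySem.Chars.isalpha) ≠ "data"))).map
      (fun f => (String.ofList (f.toList.filter PySem.Chars.isdigit), f))) with hp
  rw [show (merge.filter (fun f =>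
        decide (String.ofList (f.toList.filter PySem.Chars.isalpha) ≠ "data")))
        = pairs.map Prod.snd by simp [hp, Function.comp_def]]
  rw [List.foldl_map]
  rw [PySem.List.foldl_congr_mem pairs _
      (fun d p => d.modify p.1 [] (fun v => v ++ [p.2])) PySem.Dict.empty
      (fun d p hpmem => by
        obtain ⟨f, -, rfl⟩ := List.mem_map.mp (hp ▸ hpmem)
        rfl)]
  have hnd : (pairs.foldl (fun d p => d.modify p.1 [] (fun v => v ++ [p.2])) PySem.Dict.empty).keys.Nodup :=
    nodup_keys_group_fold pairs PySem.Dict.empty (by simp)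
  rw [PySem.Dict.items_eq_map_keys _ hnd []]
  rw [keys_group_fold]
  have hkeys : PySem.Set.update (PySem.Dict.empty : PySem.Dict String (List String)).keys (pairs.map Prod.fst)
      = PySem.List.dedup (pairs.map Prod.fst) := by
    simp [PySem.Set.update, PySem.List.dedup, PySem.Set.ofList_eq_foldl, PySem.Dict.keys_empty]
  rw [hkeys]
  apply List.map_congr_left
  intro k _
  rw [PySem.Dict.getD_foldl_modify_append]
  simp [PySem.Dict.getD_empty]

-- ===== VERDICT (by name: the statement is the Claim_ definition above) =====
theorem find_rxn_pairs_spec : Claim_equal_find_rxn_pairs := by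
  intro merge _
  unfold Spec_find_rxn_pairs
  exact find_rxn_pairs_equal merge
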